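-- pv_equiv track=rewrite | github.com/jojonki/atcoder | abc/abc189d.py | f
-- ===== SOURCE A (Python) =====
-- def f(S):
--     N = len(S)
--     if N == 0:
--         return 1
--
--     if S[-1] == 'AND':
--         return f(S[:-1])
--     else:  # OR
--         return 2**N + f(S[:-1])
-- ===== SOURCE B (Python) =====
-- def f(S):
--     # single linear pass: each non-'AND' at index i contributes 2**(i+1); plus 1
--     total = 1
--     for i, s in enumerate(S):
--         if s != 'AND':
--             total += 2 ** (i + 1)
--     return total
-- ===== Notes on version B (the rewrite author's own statement) =====
-- stated objective: faster
-- what changed: Replaced the O(N^2) tail recursion on S[:-1] slices with one linear enumerate pass summing 2**(i+1) for every non-'AND' operator, starting from 1.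
import Mathlib
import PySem

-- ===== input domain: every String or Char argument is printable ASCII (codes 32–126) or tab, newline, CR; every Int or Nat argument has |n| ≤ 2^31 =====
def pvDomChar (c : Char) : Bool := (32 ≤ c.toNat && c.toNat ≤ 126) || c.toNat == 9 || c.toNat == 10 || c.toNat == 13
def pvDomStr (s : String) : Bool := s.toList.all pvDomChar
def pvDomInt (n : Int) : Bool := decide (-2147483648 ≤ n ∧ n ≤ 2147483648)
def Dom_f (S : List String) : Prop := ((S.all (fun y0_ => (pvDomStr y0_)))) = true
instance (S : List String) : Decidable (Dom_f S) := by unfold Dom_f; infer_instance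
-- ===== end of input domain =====

-- B replaces A's quadratic suffix recursion by one linear enumerate pass (faster, asymptotic).

-- ===== PORT A =====
def f (S : List String) : Int :=
  let N := S.length
  if N = 0 then 1
  else
    if PySem.List.pyGet? S (-1) = some "AND" then
      f (PySem.List.slice S none (some (-1)))
    else
      2 ^ N + f (PySem.List.slice S none (some (-1)))
termination_by S.length
decreasing_by
  all_goals
    simp only [PySem.List.slice_to_neg_one, List.length_dropLast]
    omega

-- ===== PORT B =====
def f_alt (S : List String) : Int :=
  (PySem.List.enumerate S 0).foldl
    (fun total p => if p.2 ≠ "AND" then total + 2 ^ (p.1 + 1).toNat else total) 1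

-- ===== PRECONDITION & SPEC =====
def Spec_f (S : List String) (out : Int) : Prop := out = f_alt S
instance (S : List String) (out : Int) : Decidable (Spec_f S out) := by unfold Spec_f; infer_instance

-- ===== CLAIM (what is proved, stated in full; the proofs are below) =====
def Claim_equal_f : Prop := ∀ (S : List String), Dom_f S → Spec_f S (f S)

-- ===== LEMMAS AND PROOFS =====

theorem f_concat (T : List String) (x : String) :
    f (T ++ [x]) = if x = "AND" then f T else 2 ^ (T.length + 1) + f T := by
  rw [f]
  by_cases h : x = "AND" <;>
    simp [PySem.List.pyGet?_neg_one_append_singleton, PySem.List.slice_to_neg_one, h]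

theorem f_alt_aux (T : List String) (s : Int) (acc : Int) :
    (PySem.List.enumerate T s).foldl
      (fun total p => if p.2 ≠ "AND" then total + 2 ^ (p.1 + 1).toNat else total) acc
    = acc + (PySem.List.enumerate T s).foldl
      (fun total p => if p.2 ≠ "AND" then total + 2 ^ (p.1 + 1).toNat else total) 0 := by
  induction T generalizing s acc with
  | nil => simp [PySem.List.enumerate_nil]
  | cons y ys ih =>
    simp only [PySem.List.enumerate_cons, List.foldl_cons]
    rw [ih, ih ((s+1)) (if y ≠ "AND" then 0 + 2 ^ (s + 1).toNat else 0)]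
    split_ifs <;> ring

theorem f_alt_concat (T : List String) (x : String) :
    f_alt (T ++ [x]) = f_alt T + (if x = "AND" then 0 else 2 ^ (T.length + 1)) := by
  unfold f_alt
  rw [PySem.List.enumerate_append, List.foldl_append]
  simp only [PySem.List.enumerate_cons, PySem.List.enumerate_nil, List.foldl_cons, List.foldl_nil]
  rw [f_alt_aux T 0]
  have ht : ((0 : Int) + T.length + 1).toNat = T.length + 1 := by omega
  by_cases h : x = "AND"
  · simp [h]
  · simp [h, ht]

theorem f_eq_f_alt (S : List String) : f S = f_alt S := by
  induction S using List.reverseRecOn with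
  | nil => rw [f]; simp [f_alt, PySem.List.enumerate_nil]
  | append_singleton T x ih =>
    rw [f_concat, f_alt_concat, ih]
    split_ifs <;> ring

-- ===== VERDICT (by name: the statement is the Claim_ definition above) =====
theorem f_spec : Claim_equal_f := by
  intro S _
  unfold Spec_f
  exact f_eq_f_alt S
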